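-- pv_equiv track=rewrite | github.com/dudamarlena/pyc_source | pycfiles/convert2-0.0.3-py2-none-any/util.cpython-35.py | extract_number_from_string
-- ===== SOURCE A (Python) =====
-- def extract_number_from_string(text):
--     """Take number like string out of text.
--     """
--     numberstr_list = list()
--     chunks = list()
--     for char in text:
--         if char.isdigit() or char == '.':
--             chunks.append(char)
--         elif len(chunks):
--             numberstr_list.append(''.join(chunks))
--             chunks = list()
--
--     if len(chunks):
--         numberstr_list.append(''.join(chunks))
--     new_numberstr_list = list()
--     for s in numberstr_list:
--         try:
--             float(s)
--             new_numberstr_list.append(s)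
--         except:
--             pass
--
--     return new_numberstr_list
-- ===== SOURCE B (Python) =====
-- def extract_number_from_string(text):
--     """Take number like string out of text."""
--     def ok(c):
--         return c.isdigit() or c == '.'
--     result = []
--     i, n = 0, len(text)
--     while i < n:
--         if ok(text[i]):
--             j = i
--             while j < n and ok(text[j]):
--                 j += 1
--             s = text[i:j]
--             try:
--                 float(s)
--                 result.append(s)
--             except Exception:
--                 pass
--             i = j
--         else:
--             i += 1
--     return result
-- ===== Notes on version B (the rewrite author's own statement) =====
-- stated objective: simpler
-- what changed: Replaces the accumulate-and-flush loop plus a second validation pass with a single index-based span scan that slices each maximal digit/dot run and validates it inline.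
import Mathlib
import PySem

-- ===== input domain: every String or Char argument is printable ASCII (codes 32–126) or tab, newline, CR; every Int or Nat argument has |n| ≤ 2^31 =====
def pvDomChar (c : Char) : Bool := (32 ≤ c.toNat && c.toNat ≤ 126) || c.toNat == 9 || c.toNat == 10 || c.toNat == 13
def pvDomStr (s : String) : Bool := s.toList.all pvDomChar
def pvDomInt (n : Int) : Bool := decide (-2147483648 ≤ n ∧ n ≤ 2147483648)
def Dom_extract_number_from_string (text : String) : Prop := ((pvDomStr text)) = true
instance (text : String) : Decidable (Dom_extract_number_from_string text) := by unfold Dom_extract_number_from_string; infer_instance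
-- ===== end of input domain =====

-- B replaces A's accumulate-and-flush loop plus a second validation pass by a single span scan
-- that slices each maximal digit/dot run and validates it inline (objective: simpler).

-- the predicate 'char.isdigit() or char == "."'
def numChar (c : Char) : Bool := PySem.Chars.isdigit c || c == '.'

-- port of 'try: float(s) … except: pass' — exact for the candidate strings both programs
-- test (nonempty strings made only of ASCII digits and '.'): float(s) succeeds iff s has
-- at most one '.' and at least one digit
def floatOk (s : String) : Bool := s.toList.count '.' ≤ 1 && s.toList.any PySem.Chars.isdigit

-- ===== PORT A =====
-- the body of A's first loop: append the char to chunks, or flush a nonempty chunk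
def stepA (p : List String × List Char) (char : Char) : List String × List Char :=
  if numChar char then (p.1, p.2 ++ [char])
  else if p.2.length ≠ 0 then (p.1 ++ [String.ofList p.2], ([] : List Char))
  else p

-- the trailing 'if len(chunks): numberstr_list.append(...)'
def finalizeA (st : List String × List Char) : List String :=
  if st.2.length ≠ 0 then st.1 ++ [String.ofList st.2] else st.1

def extract_number_from_string (text : String) : List String :=
  let numberstr_list := finalizeA (text.toList.foldl stepA (([] : List String), ([] : List Char)))
  numberstr_list.foldl (fun acc s => if floatOk s then acc ++ [s] else acc) []

-- ===== PORT B =====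
-- the span scan of Source B: at a numeric char slice the maximal run, validate inline, continue after it
def bScan : List Char → List String
  | [] => []
  | c :: rest =>
    if numChar c then
      let s := String.ofList (c :: rest.takeWhile numChar)
      let rem := rest.dropWhile numChar
      if floatOk s then s :: bScan rem else bScan rem
    else bScan rest
termination_by l => l.length
decreasing_by
  · simpa using Nat.lt_succ_of_le (List.length_dropWhile_le numChar rest)
  · simpa using Nat.lt_succ_of_le (List.length_dropWhile_le numChar rest)
  · simp

def extract_number_from_string_alt (text : String) : List String :=
  bScan text.toList

-- ===== PRECONDITION & SPEC =====
def Spec_extract_number_from_string (text : String) (out : List String) : Prop := out = extract_number_from_string_alt text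
instance (text : String) (out : List String) : Decidable (Spec_extract_number_from_string text out) := by unfold Spec_extract_number_from_string; infer_instance

-- ===== CLAIM (what is proved, stated in full; the proofs are below) =====
def Claim_equal_extract_number_from_string : Prop := ∀ (text : String), Dom_extract_number_from_string text → Spec_extract_number_from_string text (extract_number_from_string text)

-- ===== LEMMAS AND PROOFS =====

-- proof-side: A's loop with the pending chunk made explicit, final flush included
def gAux (chunks : List Char) : List Char → List String
  | [] => if chunks.length ≠ 0 then [String.ofList chunks] else []
  | c :: l =>
    if numChar c then gAux (chunks ++ [c]) l
    else if chunks.length ≠ 0 then String.ofList chunks :: gAux [] l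
    else gAux [] l

lemma foldl_eq_gAux (l : List Char) : ∀ (acc : List String) (chunks : List Char),
    finalizeA (l.foldl stepA (acc, chunks)) = acc ++ gAux chunks l := by
  induction l with
  | nil =>
    intro acc chunks
    simp only [List.foldl_nil, gAux, finalizeA]
    split_ifs <;> simp
  | cons c l ih =>
    intro acc chunks
    by_cases hc : numChar c
    · simp only [List.foldl_cons, stepA, hc, if_pos, gAux, ite_true]
      exact ih acc (chunks ++ [c])
    · by_cases hch : chunks.length ≠ 0
      · simp only [List.foldl_cons, stepA, hc, Bool.false_eq_true, if_false, gAux]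
        rw [if_pos hch, if_pos hch, ih (acc ++ [String.ofList chunks]) []]
        simp
      · have hnil : chunks = [] := by simpa using hch
        subst hnil
        simp only [List.foldl_cons, stepA, hc, Bool.false_eq_true, if_false, List.length_nil,
          ne_eq, not_true_eq_false, gAux]
        exact ih acc []

lemma gAux_filter (l : List Char) :
    (gAux [] l).filter floatOk = bScan l ∧
    ∀ chunks : List Char, chunks ≠ [] →
      (gAux chunks l).filter floatOk =
        (if floatOk (String.ofList (chunks ++ l.takeWhile numChar)) then
          String.ofList (chunks ++ l.takeWhile numChar) :: bScan (l.dropWhile numChar)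
         else bScan (l.dropWhile numChar)) := by
  induction l with
  | nil =>
    refine ⟨by simp [gAux, bScan], ?_⟩
    intro chunks hne
    have hlen : chunks.length ≠ 0 := by simpa using hne
    simp only [gAux, hlen, ite_true, List.takeWhile_nil, List.dropWhile_nil, List.append_nil,
      List.filter, bScan]
    split_ifs with h <;> simp_all [List.filter]
  | cons c l ih =>
    constructor
    · by_cases hc : numChar c
      · have h2 := ih.2 [c] (by simp)
        simp only [gAux, hc, ite_true, List.nil_append] at h2 ⊢
        rw [h2, bScan]
        simp [hc]
      · simp only [gAux, hc, Bool.false_eq_true, if_false, List.length_nil, ne_eq,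
          not_true_eq_false, bScan]
        exact ih.1
    · intro chunks hne
      have hlen : chunks.length ≠ 0 := by simpa using hne
      by_cases hc : numChar c
      · have h2 := ih.2 (chunks ++ [c]) (by simp)
        simp only [gAux, hc, ite_true] at h2 ⊢
        rw [h2]
        simp [hc]
      · rw [show gAux chunks (c :: l) = String.ofList chunks :: gAux [] l from by
              simp [gAux, hc, hlen],
            show (c :: l).takeWhile numChar = [] from by simp [hc],
            show (c :: l).dropWhile numChar = c :: l from by simp [hc],
            show bScan (c :: l) = bScan l from by rw [bScan]; simp [hc]]
        by_cases hf : floatOk (String.ofList chunks) <;>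
          simp [List.filter, hf, ih.1]

-- ===== VERDICT (by name: the statement is the Claim_ definition above) =====
theorem extract_number_from_string_spec : Claim_equal_extract_number_from_string := by
  intro text _
  unfold Spec_extract_number_from_string extract_number_from_string extract_number_from_string_alt
  simp only
  rw [foldl_eq_gAux text.toList [] [], PySem.List.foldl_append_if_eq_filter]
  simpa using (gAux_filter text.toList).1
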